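-- pv_equiv track=rewrite | github.com/Subhan-khaliq/Artificial-Intelligence-Algorithms | Uniform_cost_search.py | if_not_visited
-- ===== SOURCE A (Python) =====
-- def if_not_visited(d,v):
--     p=[]
--     p=d
--     j=0
--     for i in range(len(d)):
--         if d[0][1] in v:
--             p.pop(0)
--     return p
-- ===== SOURCE B (Python) =====
-- def if_not_visited(d, v):
--     k = 0
--     for x in d:
--         if x[1] in v:
--             k += 1
--         else:
--             break
--     del d[:k]
--     return d
-- ===== Notes on version B (the rewrite author's own statement) =====
-- stated objective: faster
-- what changed: Replaces the loop of repeated pop(0) (each an O(n) front removal) by a single forward scan that counts the visited prefix and one bulk del d[:k].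
import Mathlib
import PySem

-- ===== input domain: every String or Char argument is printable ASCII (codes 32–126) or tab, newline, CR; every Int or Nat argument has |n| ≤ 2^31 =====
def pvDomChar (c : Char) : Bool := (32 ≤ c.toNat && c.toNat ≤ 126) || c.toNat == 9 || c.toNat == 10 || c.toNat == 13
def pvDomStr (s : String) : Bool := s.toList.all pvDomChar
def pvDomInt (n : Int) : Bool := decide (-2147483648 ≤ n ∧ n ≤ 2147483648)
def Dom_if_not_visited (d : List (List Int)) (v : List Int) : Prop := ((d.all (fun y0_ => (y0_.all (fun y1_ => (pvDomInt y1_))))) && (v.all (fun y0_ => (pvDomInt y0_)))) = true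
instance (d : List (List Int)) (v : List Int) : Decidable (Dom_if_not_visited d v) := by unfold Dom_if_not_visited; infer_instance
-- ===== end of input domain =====

-- B strips the visited leading prefix with one counting scan and a single bulk delete
-- instead of A's repeated pop(0); both mutate d in place, the equivalence proved is
-- about the return value.

-- ===== PORT A =====
-- one iteration of A's loop body: 'if d[0][1] in v: p.pop(0)' (p aliases d)
def pvStep (v : List Int) (p : List (List Int)) : List (List Int) :=
  match PySem.List.pyGet? p 0 with
  | some x =>
    match PySem.List.pyGet? x 1 with
    | some a => if a ∈ v then p.drop 1 else p
    | none => p        -- Python raises IndexError here (outside Pre_)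
  | none => p          -- Python raises IndexError here (outside Pre_)

def if_not_visited (d : List (List Int)) (v : List Int) : List (List Int) :=
  (List.range d.length).foldl (fun p _ => pvStep v p) d

-- ===== PORT B =====
-- length of the leading prefix whose x[1] is in v (B's counting scan)
def pvCount (v : List Int) : List (List Int) → Nat
  | [] => 0
  | x :: rest =>
    match PySem.List.pyGet? x 1 with
    | some a => if a ∈ v then pvCount v rest + 1 else 0
    | none => 0        -- Python raises IndexError here (outside Pre_)

def if_not_visited_alt (d : List (List Int)) (v : List Int) : List (List Int) :=
  d.drop (pvCount v d)

-- ===== PRECONDITION & SPEC =====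
-- Pre_ excludes exactly the inputs on which A raises IndexError: some element of d
-- that the loop actually inspects (all earlier elements are visited) has fewer than
-- 2 components, so d[0][1] fails.
-- pvSnd x = x[1] (with junk default, only used under a length guard)
def pvSnd (x : List Int) : Int := x[1]!
def Pre_if_not_visited (d : List (List Int)) (v : List Int) : Prop :=
  ∀ i < d.length, (∀ j < i, 2 ≤ (d[j]!).length ∧ pvSnd (d[j]!) ∈ v) → 2 ≤ (d[i]!).length
instance (d : List (List Int)) (v : List Int) : Decidable (Pre_if_not_visited d v) := by
  unfold Pre_if_not_visited; infer_instance

def pvWitness_if_not_visited : List (List Int) × List Int := ([[1, 2], [3, 4]], [2])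

def Spec_if_not_visited (d : List (List Int)) (v : List Int) (out : List (List Int)) : Prop := out = if_not_visited_alt d v
instance (d : List (List Int)) (v : List Int) (out : List (List Int)) : Decidable (Spec_if_not_visited d v out) := by unfold Spec_if_not_visited; infer_instance

-- ===== CLAIM (what is proved, stated in full; the proofs are below) =====
def Claim_equal_if_not_visited : Prop := ∀ (d : List (List Int)) (v : List Int), Dom_if_not_visited d v → Pre_if_not_visited d v → Spec_if_not_visited d v (if_not_visited d v)

-- ===== LEMMAS AND PROOFS =====

-- the fold over range(len d) ignores the index: it is n-fold iteration of the step
theorem pvFoldl_eq_iterate (v : List Int) (l : List Nat) (p : List (List Int)) :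
    l.foldl (fun q _ => pvStep v q) p = (pvStep v)^[l.length] p := by
  induction l generalizing p with
  | nil => rfl
  | cons a l ih => simp [List.foldl_cons, Function.iterate_succ_apply, ih]

theorem pvStep_nil (v : List Int) : pvStep v [] = [] := by
  simp [pvStep, PySem.List.pyGet?]

theorem pvIter_nil (v : List Int) (n : Nat) : (pvStep v)^[n] [] = [] := by
  induction n with
  | zero => rfl
  | succ m ih => rw [Function.iterate_succ_apply, pvStep_nil]; exact ih

theorem pvIter_fix {v : List Int} {p : List (List Int)} (h : pvStep v p = p) (n : Nat) :
    (pvStep v)^[n] p = p := by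
  induction n with
  | zero => rfl
  | succ m ih => rw [Function.iterate_succ_apply, h]; exact ih

theorem pvPre_cons_head {x : List Int} {rest : List (List Int)} {v : List Int}
    (h : Pre_if_not_visited (x :: rest) v) : 2 ≤ x.length := by
  have := h 0 (by simp) (by intro j hj; omega)
  simpa using this

theorem pvPre_cons_tail {x : List Int} {rest : List (List Int)} {v : List Int}
    (h : Pre_if_not_visited (x :: rest) v) (hx : pvSnd x ∈ v) :
    Pre_if_not_visited rest v := by
  intro i hi hall
  have := h (i + 1) (by simpa using hi) ?_
  · simpa using this
  · intro j hj
    cases j with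
    | zero => exact ⟨by simpa using pvPre_cons_head h, by simpa using hx⟩
    | succ j' =>
      have := hall j' (by omega)
      simpa using this

theorem pvGet1_of_len {x : List Int} (h : 2 ≤ x.length) :
    PySem.List.pyGet? x 1 = some (pvSnd x) := by
  rw [show (1 : Int) = ((1 : Nat) : Int) by norm_cast, PySem.List.pyGet?_natCast]
  rw [List.getElem?_eq_getElem (by omega)]
  unfold pvSnd
  rw [getElem!_pos x 1 (by omega)]

theorem pvIter_eq_drop (v : List Int) (p : List (List Int))
    (hpre : Pre_if_not_visited p v) (n : Nat) (hn : pvCount v p ≤ n) :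
    (pvStep v)^[n] p = p.drop (pvCount v p) := by
  induction p generalizing n with
  | nil => simp only [pvCount, List.drop_nil]; exact pvIter_nil v n
  | cons x rest ih =>
    have hx : 2 ≤ x.length := pvPre_cons_head hpre
    have hget : PySem.List.pyGet? x 1 = some (pvSnd x) := pvGet1_of_len hx
    by_cases hv : pvSnd x ∈ v
    · have hc : pvCount v (x :: rest) = pvCount v rest + 1 := by
        simp [pvCount, hget, hv]
      rw [hc] at hn
      obtain ⟨m, rfl⟩ : ∃ m, n = m + 1 := ⟨n - 1, by omega⟩
      have hstep : pvStep v (x :: rest) = rest := by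
        simp [pvStep, hget, hv]
      rw [Function.iterate_succ_apply, hstep, hc]
      simpa using ih (pvPre_cons_tail hpre hv) m (by omega)
    · have hc : pvCount v (x :: rest) = 0 := by simp [pvCount, hget, hv]
      have hstep : pvStep v (x :: rest) = x :: rest := by
        simp [pvStep, hget, hv]
      rw [hc, List.drop_zero]
      exact pvIter_fix hstep n

theorem pvCount_le_length (v : List Int) (p : List (List Int)) : pvCount v p ≤ p.length := by
  induction p with
  | nil => simp [pvCount]
  | cons x rest ih =>
    simp only [pvCount, List.length_cons]
    split
    · split <;> omega
    · omega

-- ===== VERDICT (by name: the statement is the Claim_ definition above) =====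
theorem if_not_visited_spec : Claim_equal_if_not_visited := by
  intro d v _ hpre
  unfold Spec_if_not_visited if_not_visited if_not_visited_alt
  rw [pvFoldl_eq_iterate, List.length_range]
  exact pvIter_eq_drop v d hpre d.length (pvCount_le_length v d)
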